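-- pv_equiv track=rewrite | github.com/haresh408/public-transport-delay-tracker | kafka/kafka_producer_script.py | csvname_to_camel_case
-- ===== SOURCE A (Python) =====
-- def csvname_to_camel_case(filename):
--     name = ""
--     if filename.endswith("_data.csv"):
--         name = filename.replace('_data.csv', '')
--     else:
--         name = filename.replace('.csv', '')
--
--     parts = name.split('_')
--
--     return parts[0].lower() + ''.join(word.capitalize() for word in parts[1:])
-- ===== SOURCE B (Python) =====
-- def csvname_to_camel_case(filename):
--     if filename.endswith("_data.csv"):
--         name = filename.replace('_data.csv', '')
--     else:
--         name = filename.replace('.csv', '')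
--     out = []
--     boundary = False  # True iff the previous kept character context was an underscore
--     for ch in name:
--         if ch == '_':
--             boundary = True
--         else:
--             out.append(ch.upper() if boundary else ch.lower())
--             boundary = False
--     return ''.join(out)
-- ===== Notes on version B (the rewrite author's own statement) =====
-- stated objective: idiomatic
-- what changed: Replaces A's splitting on underscores + per-word capitalize + join pipeline by a single left-to-right character pass carrying a word-boundary flag (upper a char right after an underscore, lower otherwise), never building the parts list.
import Mathlib
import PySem

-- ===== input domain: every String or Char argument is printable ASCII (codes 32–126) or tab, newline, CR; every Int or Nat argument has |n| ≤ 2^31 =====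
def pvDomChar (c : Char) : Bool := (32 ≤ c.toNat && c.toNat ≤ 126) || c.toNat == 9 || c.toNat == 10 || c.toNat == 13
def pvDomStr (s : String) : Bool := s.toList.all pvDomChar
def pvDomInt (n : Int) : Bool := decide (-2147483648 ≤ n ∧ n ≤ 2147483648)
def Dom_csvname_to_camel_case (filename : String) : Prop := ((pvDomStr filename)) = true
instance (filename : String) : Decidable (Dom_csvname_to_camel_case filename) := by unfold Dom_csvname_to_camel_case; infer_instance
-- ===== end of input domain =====

-- B replaces A's split('_')/capitalize/join pipeline by a single character pass with a word-boundary flag (objective: simpler/idiomatic single pass).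

-- ===== PORT A =====
-- str.capitalize(): first char upper-cased, rest lower-cased (exact on the ASCII domain)
def pyCapitalize (s : String) : String :=
  match s.toList with
  | [] => ""
  | c :: cs => String.ofList (PySem.Chars.upperChar c :: PySem.Chars.lower cs)

def csvname_to_camel_case (filename : String) : String :=
  let name := if PySem.Str.endswith filename "_data.csv" then
      PySem.Str.replace filename "_data.csv" ""
    else
      PySem.Str.replace filename ".csv" ""
  match PySem.Str.split? name "_" with
  | some (p :: rest) => PySem.Str.lower p ++ PySem.Str.join "" (rest.map pyCapitalize)
  | _ => ""   -- unreachable: split('_') always returns some nonempty list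

-- ===== PORT B =====
-- the single-pass loop of Source B: boundary is True right after an underscore
def camelChars : Bool → List Char → List Char
  | _, [] => []
  | b, c :: cs =>
    if c = '_' then camelChars true cs
    else (if b then PySem.Chars.upperChar c else PySem.Chars.lowerChar c) :: camelChars false cs

def csvname_to_camel_case_alt (filename : String) : String :=
  let name := if PySem.Str.endswith filename "_data.csv" then
      PySem.Str.replace filename "_data.csv" ""
    else
      PySem.Str.replace filename ".csv" ""
  String.ofList (camelChars false name.toList)

-- ===== PRECONDITION & SPEC =====
def Spec_csvname_to_camel_case (filename : String) (out : String) : Prop := out = csvname_to_camel_case_alt filename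
instance (filename : String) (out : String) : Decidable (Spec_csvname_to_camel_case filename out) := by unfold Spec_csvname_to_camel_case; infer_instance

-- ===== CLAIM (what is proved, stated in full; the proofs are below) =====
def Claim_equal_csvname_to_camel_case : Prop := ∀ (filename : String), Dom_csvname_to_camel_case filename → Spec_csvname_to_camel_case filename (csvname_to_camel_case filename)

-- ===== LEMMAS AND PROOFS =====

-- reference splitter: splitOn with separator "_" as a plain structural recursion
def pvSplit (pre : List Char) : List Char → List (List Char)
  | [] => [pre]
  | c :: r => if c = '_' then pre :: pvSplit [] r else pvSplit (pre ++ [c]) r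

-- capitalize on the list side
def capC : List Char → List Char
  | [] => []
  | c :: cs => PySem.Chars.upperChar c :: PySem.Chars.lower cs

lemma toList_pyCapitalize (s : String) : (pyCapitalize s).toList = capC s.toList := by
  unfold pyCapitalize
  rcases h : s.toList with _ | ⟨c, cs⟩ <;> simp [capC]

lemma go_eq (fuel : Nat) : ∀ (l cur : List Char) (accs : List (List Char)),
    l.length < fuel →
    PySem.Chars.splitOn.go ['_'] fuel l cur accs = accs.reverse ++ pvSplit cur.reverse l := by
  induction fuel with
  | zero => intro l cur accs h; omega
  | succ f ih =>
    intro l cur accs h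
    cases l with
    | nil => simp [PySem.Chars.splitOn.go, pvSplit]
    | cons c r =>
      by_cases hc : c = '_'
      · subst hc
        simp only [PySem.Chars.splitOn.go, List.isPrefixOf, beq_self_eq_true, Bool.true_and]
        rw [if_pos (by simp)]
        show PySem.Chars.splitOn.go ['_'] f r [] (cur.reverse :: accs) = _
        rw [ih r [] (cur.reverse :: accs) (by simp at h ⊢; omega)]
        simp [pvSplit]
      · simp only [PySem.Chars.splitOn.go]
        rw [if_neg (by simp [List.isPrefixOf]; exact fun h => hc h.symm)]
        rw [ih r (c :: cur) accs (by simp at h ⊢; omega)]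
        simp [pvSplit, hc]

lemma splitOn_eq (l : List Char) : PySem.Chars.splitOn l ['_'] = pvSplit [] l := by
  have := go_eq (l.length + 1) l [] []
  simpa [PySem.Chars.splitOn] using this (by omega)

lemma caps_flatten (r : List Char) : ∀ pre,
    ((pvSplit pre r).map capC).flatten =
      if pre = [] then camelChars true r else capC pre ++ camelChars false r := by
  induction r with
  | nil =>
    intro pre
    rcases pre with _ | ⟨p, ps⟩ <;> simp [pvSplit, capC, camelChars]
  | cons c t ih =>
    intro pre
    by_cases hc : c = '_'
    · subst hc
      have h0 := ih []
      rcases pre with _ | ⟨p, ps⟩ <;>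
        simp only [pvSplit] <;> simp [h0, camelChars, capC]
    · have h1 := ih (pre ++ [c])
      simp [pvSplit, hc, h1, camelChars]
      rcases pre with _ | ⟨p, ps⟩
      · simp [capC, PySem.Chars.lower]
      · simp [capC, PySem.Chars.lower]

lemma first_lower (r : List Char) : ∀ pre, ∃ p ps, pvSplit pre r = p :: ps ∧
    PySem.Chars.lower p ++ ((ps.map capC).flatten) =
      PySem.Chars.lower pre ++ camelChars false r := by
  induction r with
  | nil =>
    intro pre
    exact ⟨pre, [], by simp [pvSplit], by simp [camelChars]⟩
  | cons c t ih =>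
    intro pre
    by_cases hc : c = '_'
    · subst hc
      refine ⟨pre, pvSplit [] t, by simp [pvSplit], ?_⟩
      have h0 := caps_flatten t []
      simp at h0
      simp [h0, camelChars]
    · obtain ⟨p, ps, hsplit, heq⟩ := ih (pre ++ [c])
      refine ⟨p, ps, by simp [pvSplit, hc, hsplit], ?_⟩
      rw [heq]
      simp [PySem.Chars.lower, camelChars, hc]

lemma join_nil_flatten (xs : List (List Char)) :
    PySem.Chars.join [] xs = xs.flatten := by
  simp only [PySem.Chars.join, List.intercalate]
  induction xs with
  | nil => simp
  | cons a l ih => cases l <;> simp_all [List.intersperse]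

-- ===== VERDICT (by name: the statement is the Claim_ definition above) =====
theorem csvname_to_camel_case_spec : Claim_equal_csvname_to_camel_case := by
  intro filename _
  unfold Spec_csvname_to_camel_case csvname_to_camel_case csvname_to_camel_case_alt
  set name := (if PySem.Str.endswith filename "_data.csv" then
      PySem.Str.replace filename "_data.csv" ""
    else
      PySem.Str.replace filename ".csv" "") with hname
  obtain ⟨p, ps, hsplit, heq⟩ := first_lower name.toList []
  have hs : PySem.Str.split? name "_" = some (String.ofList p :: ps.map String.ofList) := by
    simp [PySem.Str.split?, PySem.Chars.split?]
    rw [splitOn_eq, hsplit]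
    simp
  show (match PySem.Str.split? name "_" with
    | some (p :: rest) => PySem.Str.lower p ++ PySem.Str.join "" (rest.map pyCapitalize)
    | _ => "") = String.ofList (camelChars false name.toList)
  rw [hs]
  apply String.toList_inj.mp
  simp only [String.toList_append, PySem.Str.toList_lower, PySem.Str.toList_join,
    String.toList_ofList, List.map_map]
  have hcap : List.map (fun x => (pyCapitalize (String.ofList x)).toList) ps = ps.map capC := by
    simp [toList_pyCapitalize]
  simp only [Function.comp_def]
  rw [show "".toList = ([] : List Char) from rfl, hcap, join_nil_flatten]
  simpa [PySem.Chars.lower] using heq
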